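-- pv_equiv track=rewrite | github.com/Kontowicz/Daily-Interview-Pro | solutions/day_66.py | chainedWords
-- ===== SOURCE A (Python) =====
-- def chainedWords(words):
--     start_letters = {}
--     last_letters = {}
--
--     for word in words:
--         start = word[0]
--         last = word[-1]
--
--         if start not in start_letters:
--             start_letters[start] = 1
--         else:
--             start_letters[start] = start_letters[start] + 1
--
--         if last not in last_letters:
--             last_letters[last] = 1
--         else:
--             last_letters[last] = last_letters[last] + 1
--
--     if last_letters == start_letters:
--         return True
--     return False
-- ===== SOURCE B (Python) =====
-- def chainedWords(words):
--     return sorted(word[0] for word in words) == sorted(word[-1] for word in words)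
-- ===== Notes on version B (the rewrite author's own statement) =====
-- stated objective: idiomatic
-- what changed: B tests multiset equality of first letters vs last letters by sorting the two projected letter lists and comparing them, instead of A's per-letter frequency dicts compared with dict equality.
import Mathlib
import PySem

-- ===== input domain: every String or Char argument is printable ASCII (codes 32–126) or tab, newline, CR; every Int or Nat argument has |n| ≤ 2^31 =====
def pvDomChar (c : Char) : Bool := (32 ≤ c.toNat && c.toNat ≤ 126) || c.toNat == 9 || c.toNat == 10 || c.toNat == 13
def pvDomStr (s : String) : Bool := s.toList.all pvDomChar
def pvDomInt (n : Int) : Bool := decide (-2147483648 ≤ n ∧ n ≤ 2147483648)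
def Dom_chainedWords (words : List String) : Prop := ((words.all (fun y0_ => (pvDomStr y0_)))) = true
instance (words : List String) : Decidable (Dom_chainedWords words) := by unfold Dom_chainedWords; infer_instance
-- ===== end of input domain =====

-- B replaces A's two frequency dicts compared with dict == by a sort-and-compare
-- multiset test: sorted first letters vs sorted last letters (idiomatic one-liner).

-- ===== PORT A =====
-- Python dict equality (`last_letters == start_letters`) ignores insertion order:
-- compare the two dicts key-by-key in both directions (exact for dicts with unique keys).
def pvDictEq (d e : PySem.Dict Char Int) : Bool :=
  (d.keys.all fun k => d.get? k == e.get? k) && (e.keys.all fun k => e.get? k == d.get? k)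

-- the `for word in words` loop of A; `none` = IndexError on `word[0]` / `word[-1]` (empty word)
def chainedWordsLoopA :
    List String → PySem.Dict Char Int → PySem.Dict Char Int →
    Option (PySem.Dict Char Int × PySem.Dict Char Int)
  | [], sd, ld => some (sd, ld)
  | w :: ws, sd, ld =>
    match PySem.Str.pyGet? w 0, PySem.Str.pyGet? w (-1) with
    | some start, some lastc =>
        let sd' := if sd.contains start = false then sd.insert start 1
                   else sd.insert start (sd.getD start 0 + 1)
        let ld' := if ld.contains lastc = false then ld.insert lastc 1
                   else ld.insert lastc (ld.getD lastc 0 + 1)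
        chainedWordsLoopA ws sd' ld'
    | _, _ => none

def chainedWords (words : List String) : Bool :=
  match chainedWordsLoopA words PySem.Dict.empty PySem.Dict.empty with
  | some (sd, ld) => pvDictEq ld sd
  | none => false  -- unreachable under Pre_ (Python raises IndexError there)

-- ===== PORT B =====
-- the two generator expressions `word[0] for word in words` / `word[-1] for word in words`;
-- `none` = IndexError on an empty word
def chainedWordsFirsts : List String → Option (List Char)
  | [] => some []
  | w :: ws =>
    match PySem.Str.pyGet? w 0, chainedWordsFirsts ws with
    | some c, some cs => some (c :: cs)
    | _, _ => none

def chainedWordsLasts : List String → Option (List Char)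
  | [] => some []
  | w :: ws =>
    match PySem.Str.pyGet? w (-1), chainedWordsLasts ws with
    | some c, some cs => some (c :: cs)
    | _, _ => none

def chainedWords_alt (words : List String) : Bool :=
  match chainedWordsFirsts words, chainedWordsLasts words with
  | some fs, some ls =>
      PySem.List.sorted fs (fun x => x) false == PySem.List.sorted ls (fun x => x) false
  | _, _ => false  -- unreachable under Pre_ (Python raises IndexError there)

-- ===== PRECONDITION & SPEC =====
-- Pre_ excludes exactly the inputs containing an empty word, on which A (and B) raise IndexError at word[0].
def Pre_chainedWords (words : List String) : Prop := ∀ w ∈ words, w.toList ≠ []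
instance (words : List String) : Decidable (Pre_chainedWords words) := by
  unfold Pre_chainedWords; infer_instance

def pvWitness_chainedWords : List String := ["ab", "bca", "ac"]

def Spec_chainedWords (words : List String) (out : Bool) : Prop := out = chainedWords_alt words
instance (words : List String) (out : Bool) : Decidable (Spec_chainedWords words out) := by
  unfold Spec_chainedWords; infer_instance

-- ===== CLAIM (what is proved, stated in full; the proofs are below) =====
def Claim_equal_chainedWords : Prop :=
  ∀ (words : List String), Dom_chainedWords words → Pre_chainedWords words →
    Spec_chainedWords words (chainedWords words)

-- ===== LEMMAS AND PROOFS =====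
def pvHeads (ws : List String) : List Char := ws.map fun w => w.toList.headI
def pvLasts (ws : List String) : List Char := ws.map fun w => w.toList.getLastI

theorem pvStr_pyGet_zero (w : String) (h : w.toList ≠ []) :
    PySem.Str.pyGet? w 0 = some w.toList.headI := by
  simp only [pysem]
  cases hcs : w.toList with
  | nil => exact absurd hcs h
  | cons c t => simp

theorem pvStr_pyGet_neg_one (w : String) (h : w.toList ≠ []) :
    PySem.Str.pyGet? w (-1) = some w.toList.getLastI := by
  simp only [pysem]
  rw [List.getLastI_eq_getLast?]
  cases hg : w.toList.getLast? with
  | none => exact absurd (List.getLast?_eq_none_iff.mp hg) h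
  | some x => simp

-- A's if/else update is insert (getD + 1) in both branches
theorem pvStepA (d : PySem.Dict Char Int) (x : Char) :
    (if d.contains x = false then d.insert x 1 else d.insert x (d.getD x 0 + 1))
      = d.insert x (d.getD x 0 + 1) := by
  by_cases hc : d.contains x = false
  · rw [if_pos hc]
    have h0 : d.getD x 0 = 0 := by simp [PySem.Dict.getD_of_not_contains, hc]
    rw [h0]
    norm_num
  · rw [if_neg hc]

theorem pvLoopA_eq (ws : List String) (h : ∀ w ∈ ws, w.toList ≠ [])
    (sd ld : PySem.Dict Char Int) :
    chainedWordsLoopA ws sd ld = some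
      ((pvHeads ws).foldl (fun d x => d.insert x (d.getD x 0 + 1)) sd,
       (pvLasts ws).foldl (fun d x => d.insert x (d.getD x 0 + 1)) ld) := by
  induction ws generalizing sd ld with
  | nil => simp [chainedWordsLoopA, pvHeads, pvLasts]
  | cons w ws ih =>
    have hw : w.toList ≠ [] := h w (List.mem_cons_self)
    simp only [chainedWordsLoopA, pvStr_pyGet_zero w hw, pvStr_pyGet_neg_one w hw]
    rw [pvStepA, pvStepA, ih (fun v hv => h v (List.mem_cons_of_mem _ hv))]
    simp [pvHeads, pvLasts]

theorem pvFirsts_eq (ws : List String) (h : ∀ w ∈ ws, w.toList ≠ []) :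
    chainedWordsFirsts ws = some (pvHeads ws) := by
  induction ws with
  | nil => simp [chainedWordsFirsts, pvHeads]
  | cons w ws ih =>
    have hw : w.toList ≠ [] := h w (List.mem_cons_self)
    simp only [chainedWordsFirsts, pvStr_pyGet_zero w hw,
      ih (fun v hv => h v (List.mem_cons_of_mem _ hv))]
    simp [pvHeads]

theorem pvLasts_eq (ws : List String) (h : ∀ w ∈ ws, w.toList ≠ []) :
    chainedWordsLasts ws = some (pvLasts ws) := by
  induction ws with
  | nil => simp [chainedWordsLasts, pvLasts]
  | cons w ws ih =>
    have hw : w.toList ≠ [] := h w (List.mem_cons_self)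
    simp only [chainedWordsLasts, pvStr_pyGet_neg_one w hw,
      ih (fun v hv => h v (List.mem_cons_of_mem _ hv))]
    simp [pvLasts]

set_option maxHeartbeats 1000000 in
theorem pvGet?_counter (xs : List Char) (v : Char) :
    (PySem.Dict.counter xs).get? v = if v ∈ xs then some ((xs.count v : Nat) : Int) else none := by
  by_cases hv : v ∈ xs
  · have hc : (PySem.Dict.counter xs).contains v = true := by
      rw [PySem.Dict.contains_iff_mem_keys, PySem.Dict.keys_counter]
      exact (PySem.Set.mem_ofList _ _).mpr hv
    have hsome : ((PySem.Dict.counter xs).get? v).isSome = true := by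
      rw [← PySem.Dict.contains_eq_isSome_get?]; exact hc
    obtain ⟨w, hw⟩ := Option.isSome_iff_exists.mp hsome
    have : (PySem.Dict.counter xs).getD v 0 = w := PySem.Dict.getD_of_get?_eq_some _ _ hw
    rw [PySem.Dict.getD_counter] at this
    rw [hw, if_pos hv, ← this]
  · have hc : (PySem.Dict.counter xs).contains v = false := by
      rw [Bool.eq_false_iff]
      intro hcon
      rw [PySem.Dict.contains_iff_mem_keys, PySem.Dict.keys_counter] at hcon
      exact hv ((PySem.Set.mem_ofList _ _).mp hcon)
    rw [if_neg hv]
    exact (PySem.Dict.get?_eq_none_iff_contains _ _).mpr hc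

-- A's final dict equality, characterised: the two counters agree at every letter
theorem pvDictEq_counter_iff (L H : List Char) :
    pvDictEq (PySem.Dict.counter L) (PySem.Dict.counter H) = true ↔
      ∀ c, L.count c = H.count c := by
  constructor
  · intro hall c
    rw [pvDictEq, Bool.and_eq_true, List.all_eq_true, List.all_eq_true] at hall
    obtain ⟨h1, h2⟩ := hall
    by_cases hcL : c ∈ L
    · have hk : c ∈ (PySem.Dict.counter L).keys := by
        rw [PySem.Dict.keys_counter]; exact (PySem.Set.mem_ofList _ _).mpr hcL
      have := h1 c hk
      rw [beq_iff_eq, pvGet?_counter, pvGet?_counter, if_pos hcL] at this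
      by_cases hcH : c ∈ H
      · rw [if_pos hcH] at this
        exact_mod_cast Option.some.inj this
      · rw [if_neg hcH] at this; exact absurd this (by simp)
    · by_cases hcH : c ∈ H
      · have hk : c ∈ (PySem.Dict.counter H).keys := by
          rw [PySem.Dict.keys_counter]; exact (PySem.Set.mem_ofList _ _).mpr hcH
        have := h2 c hk
        rw [beq_iff_eq, pvGet?_counter, pvGet?_counter, if_pos hcH, if_neg hcL] at this
        exact absurd this (by simp)
      · rw [List.count_eq_zero_of_not_mem hcL, List.count_eq_zero_of_not_mem hcH]
  · intro hcnt
    rw [pvDictEq, Bool.and_eq_true, List.all_eq_true, List.all_eq_true]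
    constructor
    · intro c hk
      rw [PySem.Dict.keys_counter] at hk
      have hcL : c ∈ L := (PySem.Set.mem_ofList _ _).mp hk
      have hcH : c ∈ H := by
        rw [← List.count_pos_iff, ← hcnt c, List.count_pos_iff]; exact hcL
      rw [beq_iff_eq, pvGet?_counter, pvGet?_counter, if_pos hcL, if_pos hcH, hcnt c]
    · intro c hk
      rw [PySem.Dict.keys_counter] at hk
      have hcH : c ∈ H := (PySem.Set.mem_ofList _ _).mp hk
      have hcL : c ∈ L := by
        rw [← List.count_pos_iff, hcnt c, List.count_pos_iff]; exact hcH
      rw [beq_iff_eq, pvGet?_counter, pvGet?_counter, if_pos hcL, if_pos hcH, hcnt c]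

-- ===== VERDICT (by name: the statement is the Claim_ definition above) =====
theorem chainedWords_spec : Claim_equal_chainedWords := by
  intro words _ hpre
  unfold Spec_chainedWords
  have hne : ∀ w ∈ words, w.toList ≠ [] := hpre
  -- A side: the loop builds the two letter counters
  have hA : chainedWords words
      = pvDictEq (PySem.Dict.counter (pvLasts words)) (PySem.Dict.counter (pvHeads words)) := by
    rw [chainedWords, pvLoopA_eq words hne,
      PySem.Dict.foldl_insert_getD_add_one_eq_counter,
      PySem.Dict.foldl_insert_getD_add_one_eq_counter]
  -- B side: sort-and-compare of the two projected letter lists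
  have hB : chainedWords_alt words
      = (PySem.List.sorted (pvHeads words) (fun x => x) false
          == PySem.List.sorted (pvLasts words) (fun x => x) false) := by
    rw [chainedWords_alt, pvFirsts_eq words hne, pvLasts_eq words hne]
  rw [hA, hB, Bool.eq_iff_iff, pvDictEq_counter_iff, beq_iff_eq,
    PySem.List.sorted_id_eq_sorted_id_iff_perm, List.perm_iff_count]
  exact ⟨fun h c => (h c).symm, fun h c => (h c).symm⟩
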